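-- pv_equiv track=rewrite | github.com/Masfight/disk-failure-prediction-ml | web/web_app.py | calc_risk_counts
-- ===== SOURCE A (Python) =====
-- def calc_risk_counts(items):
--     counts = {"low": 0, "medium": 0, "high": 0}
--     for r in items or []:
--         cls = r.get("predicted_class")
--         if cls == 0:
--             counts["low"] += 1
--         elif cls == 1:
--             counts["medium"] += 1
--         elif cls == 2:
--             counts["high"] += 1
--     return counts
-- ===== SOURCE B (Python) =====
-- def calc_risk_counts(items):
--     src = items or []
--     return {
--         "low": sum(1 for r in src if r.get("predicted_class") == 0),
--         "medium": sum(1 for r in src if r.get("predicted_class") == 1),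
--         "high": sum(1 for r in src if r.get("predicted_class") == 2),
--     }
-- ===== Notes on version B (the rewrite author's own statement) =====
-- stated objective: alternative
-- what changed: Replaces the single stateful loop that increments a mutable counts dict with a dict literal whose three bucket values are computed by independent generator-expression scans.
import Mathlib
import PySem

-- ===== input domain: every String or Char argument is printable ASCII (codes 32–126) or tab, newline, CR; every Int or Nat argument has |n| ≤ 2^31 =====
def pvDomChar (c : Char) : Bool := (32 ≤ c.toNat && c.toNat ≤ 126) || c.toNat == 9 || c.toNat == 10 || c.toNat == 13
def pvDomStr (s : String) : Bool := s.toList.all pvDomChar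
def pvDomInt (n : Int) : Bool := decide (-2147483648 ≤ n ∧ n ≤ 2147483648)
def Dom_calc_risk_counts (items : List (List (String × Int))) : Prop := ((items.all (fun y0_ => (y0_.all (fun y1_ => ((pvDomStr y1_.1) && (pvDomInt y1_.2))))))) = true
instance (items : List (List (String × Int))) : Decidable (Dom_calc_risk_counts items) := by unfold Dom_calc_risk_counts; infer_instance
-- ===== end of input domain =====

-- One honest line: B builds the result as a dict literal of three independent per-bucket
-- scans instead of A's single loop over a mutable counts dict (objective: alternative).

-- ===== PORT A =====
-- r.get("predicted_class"): the Python argument is a dict, modelled as an assoc list.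
def pvGetCls (r : List (String × Int)) : Option Int :=
  (PySem.Dict.ofList r).get? "predicted_class"

def calc_risk_counts (items : List (List (String × Int))) : List (String × Int) :=
  (items.foldl
    (fun counts r =>
      let cls := pvGetCls r
      if cls == some 0 then counts.insert "low" (counts.getD "low" 0 + 1)
      else if cls == some 1 then counts.insert "medium" (counts.getD "medium" 0 + 1)
      else if cls == some 2 then counts.insert "high" (counts.getD "high" 0 + 1)
      else counts)
    (PySem.Dict.ofList [("low", 0), ("medium", 0), ("high", 0)])).items

-- ===== PORT B =====
def calc_risk_counts_alt (items : List (List (String × Int))) : List (String × Int) :=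
  [("low", (items.countP (fun r => pvGetCls r == some 0) : Int)),
   ("medium", (items.countP (fun r => pvGetCls r == some 1) : Int)),
   ("high", (items.countP (fun r => pvGetCls r == some 2) : Int))]

-- ===== PRECONDITION & SPEC =====
def Spec_calc_risk_counts (items : List (List (String × Int))) (out : List (String × Int)) : Prop := out = calc_risk_counts_alt items
instance (items : List (List (String × Int))) (out : List (String × Int)) : Decidable (Spec_calc_risk_counts items out) := by unfold Spec_calc_risk_counts; infer_instance

-- ===== CLAIM (what is proved, stated in full; the proofs are below) =====
def Claim_equal_calc_risk_counts : Prop := ∀ (items : List (List (String × Int))), Dom_calc_risk_counts items → Spec_calc_risk_counts items (calc_risk_counts items)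

-- ===== LEMMAS AND PROOFS =====
-- the loop body of port A, named so the induction can cite it
def stepA (counts : PySem.Dict String Int) (r : List (String × Int)) : PySem.Dict String Int :=
  let cls := pvGetCls r
  if cls == some 0 then counts.insert "low" (counts.getD "low" 0 + 1)
  else if cls == some 1 then counts.insert "medium" (counts.getD "medium" 0 + 1)
  else if cls == some 2 then counts.insert "high" (counts.getD "high" 0 + 1)
  else counts

lemma calc_eq_foldl_stepA (items : List (List (String × Int))) :
    calc_risk_counts items
      = (items.foldl stepA (PySem.Dict.mk [("low", 0), ("medium", 0), ("high", 0)])).items := rfl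

lemma stepA_mk (a b c : Int) (x : List (String × Int)) :
    stepA (PySem.Dict.mk [("low", a), ("medium", b), ("high", c)]) x
      = if pvGetCls x = some 0 then PySem.Dict.mk [("low", a + 1), ("medium", b), ("high", c)]
        else if pvGetCls x = some 1 then PySem.Dict.mk [("low", a), ("medium", b + 1), ("high", c)]
        else if pvGetCls x = some 2 then PySem.Dict.mk [("low", a), ("medium", b), ("high", c + 1)]
        else PySem.Dict.mk [("low", a), ("medium", b), ("high", c)] := by
  simp only [stepA]
  split_ifs with h0 h1 h2 <;>
    simp_all [PySem.Dict.insert, PySem.Dict.getD, PySem.Dict.get?, PySem.Dict.contains]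

lemma foldA_shape (l : List (List (String × Int))) (a b c : Int) :
    l.foldl stepA (PySem.Dict.mk [("low", a), ("medium", b), ("high", c)])
    = PySem.Dict.mk
        [("low", a + (l.countP (fun r => pvGetCls r == some 0) : Int)),
         ("medium", b + (l.countP (fun r => pvGetCls r == some 1) : Int)),
         ("high", c + (l.countP (fun r => pvGetCls r == some 2) : Int))] := by
  induction l generalizing a b c with
  | nil => simp
  | cons x xs ih =>
      rw [List.foldl_cons, stepA_mk]
      simp only [List.countP_cons]
      by_cases h0 : pvGetCls x = some 0
      · rw [if_pos h0, ih]; simp [h0]; push_cast; ring_nf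
      · by_cases h1 : pvGetCls x = some 1
        · rw [if_neg h0, if_pos h1, ih]; simp [h0, h1]; push_cast; ring_nf
        · by_cases h2 : pvGetCls x = some 2
          · rw [if_neg h0, if_neg h1, if_pos h2, ih]; simp [h0, h1, h2]; push_cast; ring_nf
          · rw [if_neg h0, if_neg h1, if_neg h2, ih]; simp [h0, h1, h2]

-- ===== VERDICT (by name: the statement is the Claim_ definition above) =====
theorem calc_risk_counts_spec : Claim_equal_calc_risk_counts := by
  intro items _
  show _ = _
  rw [calc_eq_foldl_stepA, foldA_shape]
  simp [calc_risk_counts_alt]
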